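-- pv_equiv track=rewrite | github.com/sametormanli/regex-engine | script.py | stage_3
-- ===== SOURCE A (Python) =====
-- def comparing(regex, string):
--     if regex == ".":
--         regex = string
--
--     if not regex:
--         return True
--     elif not string:
--         return True if not regex else False
--     else:
--         return True if regex == string else False
--
-- def matching(regex, string):
--     metachar_lst = ["?", "*", "+"]
--     regex = regex.strip('\\')  # added strip
--     if regex:
--         if string:
--             if len(regex) > 1 and regex[1] in metachar_lst and regex[0] != '\\':  # added and regex[0] != '\\'
--                 return stage_5(regex, string)
--             else:
--                 if comparing(regex[0], string[0]):
--                     regex = regex[1:]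
--                     string = string[1:]
--                     return matching(regex, string)
--                 else:
--                     return False
--         else:
--             if regex[0] == "$":
--                 return True
--             else:
--                 return False
--     else:
--         return True
--
-- def stage_3(regex, string):
--     if comparing(regex, string):
--         return True
--     else:
--         if not string:
--             return False
--         else:
--             if matching(regex, string):
--                 return True
--             else:
--                 string = string[1:]
--                 return stage_3(regex, string)
--
-- def stage_5(regex, string):
--     if regex[1] == "?":
--         return what(regex, string)
--     elif regex[1] == "*":
--         return mult(regex, string)
--     elif regex[1] == "+":
--         return plus(regex, string)
--
-- def what(regex, string):
--     if comparing(regex[0], string[0]):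
--         regex = regex[2:]
--         string = string[1:]
--         return matching(regex, string)
--     else:
--         regex = regex[2:]
--         return matching(regex, string)
--
-- def mult(regex, string):
--     if comparing(regex[0], string[0]):
--         if len(string) == 1:
--             regex = regex[2:]
--             return matching(regex, string)
--         else:
--             string = string[1:]
--             return matching(regex, string)
--     else:
--         regex = regex[2:]
--         return matching(regex, string)
--
-- def plus(regex, string):
--     if comparing(regex[0], string[0]):
--         if len(string) == 1:
--             regex = regex[2:]
--             return matching(regex, string)
--         else:
--             if comparing(string[0], string[1]):
--                 string = string[1:]
--                 return matching(regex, string)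
--             else:
--                 regex = regex[2:]
--                 string = string[1:]
--                 return matching(regex, string)
--     else:
--         return False
-- ===== SOURCE B (Python) =====
-- def m(r, s):
--     # one self-recursive matcher replacing A's mutual matching/stage_5/what/mult/plus;
--     # comparing on single chars is inlined as (x == '.' or x == y)
--     r = r.strip('\\')
--     if not r:
--         return True
--     if not s:
--         return r[0] == '$'
--     a, c = r[0], s[0]
--     eq = a == '.' or a == c
--     if len(r) > 1 and r[1] in "?*+" and a != '\\':
--         b = r[1]
--         if b == '?':
--             return m(r[2:], s[1:]) if eq else m(r[2:], s)
--         if b == '*':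
--             if eq:
--                 return m(r[2:], s) if len(s) == 1 else m(r, s[1:])
--             return m(r[2:], s)
--         # b == '+'
--         if not eq:
--             return False
--         if len(s) == 1:
--             return m(r[2:], s)
--         if s[0] == '.' or s[0] == s[1]:
--             return m(r, s[1:])
--         return m(r[2:], s[1:])
--     return m(r[1:], s[1:]) if eq else False
--
-- def stage_3(regex, string):
--     # the per-suffix comparing checks collapse to one closed test; the matching
--     # checks become a single scan of m over the proper suffixes
--     if regex in ("", ".") or string.endswith(regex):
--         return True
--     return any(m(regex, string[i:]) for i in range(len(string)))
-- ===== Notes on version B (the rewrite author's own statement) =====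
-- stated objective: simpler
-- what changed: stage_3's per-suffix tail recursion collapses to one closed empty/dot/endswith test plus a single any() scan over proper suffixes, and the five mutually recursive helpers (matching/stage_5/what/mult/plus with comparing) are fused into one self-recursive matcher m with the single-char comparison inlined.
import Mathlib
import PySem

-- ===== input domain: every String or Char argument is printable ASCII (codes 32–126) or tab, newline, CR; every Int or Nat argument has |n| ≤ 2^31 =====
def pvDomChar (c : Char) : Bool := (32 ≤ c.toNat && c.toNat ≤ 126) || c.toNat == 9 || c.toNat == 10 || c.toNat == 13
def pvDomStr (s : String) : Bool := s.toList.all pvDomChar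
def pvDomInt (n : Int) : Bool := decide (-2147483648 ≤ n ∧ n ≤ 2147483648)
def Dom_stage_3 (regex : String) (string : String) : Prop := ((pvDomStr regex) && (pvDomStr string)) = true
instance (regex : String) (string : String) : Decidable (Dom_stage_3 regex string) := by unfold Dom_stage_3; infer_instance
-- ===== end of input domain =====

-- B collapses stage_3's per-suffix tail recursion into a closed endswith test plus one
-- any-scan, and fuses A's five mutually recursive helpers into one self-recursive
-- matcher mAlt (objective: simpler).


-- ===== PORT A =====
-- comparing(regex, string)
def comparingL (r s : List Char) : Bool :=
  let r := if r = ['.'] then s else r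
  if r = [] then true
  else if s = [] then (if r = [] then true else false)
  else r = s

-- regex.strip('\\')
def stripBS (r : List Char) : List Char := PySem.Chars.stripChars r ['\\']

-- needed by the ports' termination proofs (decreasing_by cites it by name)
theorem stripBS_length_le (r : List Char) : (stripBS r).length ≤ r.length := by
  simp only [stripBS, PySem.Chars.stripChars, List.length_reverse]
  calc (List.dropWhile _ (List.dropWhile _ r).reverse).length
      ≤ (List.dropWhile _ r).reverse.length := List.length_dropWhile_le _ _
    _ = (List.dropWhile _ r).length := List.length_reverse
    _ ≤ r.length := List.length_dropWhile_le _ _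

mutual
-- matching(regex, string): regex[0]/regex[1]/string[0] accesses are rendered by the
-- pattern match on the stripped regex / the string (exact on the shapes Python reaches)
def matchingL (r s : List Char) : Bool :=
  match h : stripBS r with
  | [] => true
  | a :: rt =>
    match s with
    | [] => a = '$'
    | c :: st =>
      match rt with
      | b :: _ =>
        if (b = '?' || b = '*' || b = '+') && !(a = '\\') then stage_5L (a :: rt) (c :: st)
        else if comparingL [a] [c] then matchingL rt st else false
      | [] => if comparingL [a] [c] then matchingL rt st else false
  termination_by 3 * (r.length + s.length) + 2
  decreasing_by
    all_goals simp_wf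
    all_goals
      have hL := stripBS_length_le r
      first
      | omega
      | (simp_all; omega)
      | simp_all

-- stage_5(regex, string); Python falls through (None) when regex[1] is no metachar —
-- unreachable from matching, rendered as false; shapes without regex[1] likewise
def stage_5L (r s : List Char) : Bool :=
  match hr : r with
  | _ :: b :: _ =>
    if b = '?' then whatL r s
    else if b = '*' then multL r s
    else if b = '+' then plusL r s
    else false
  | _ => false
  termination_by 3 * (r.length + s.length) + 1
  decreasing_by
    all_goals simp_wf
    all_goals
      have hL := stripBS_length_le r
      first
      | omega
      | (simp_all; omega)
      | simp_all

def whatL (r s : List Char) : Bool :=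
  match hr : r, hs : s with
  | a :: _ :: rest, c :: st =>
    if comparingL [a] [c] then matchingL rest st else matchingL rest s
  | _, _ => false
  termination_by 3 * (r.length + s.length)
  decreasing_by
    all_goals simp_wf
    all_goals
      have hL := stripBS_length_le r
      first
      | omega
      | (simp_all; omega)
      | simp_all

def multL (r s : List Char) : Bool :=
  match hr : r, hs : s with
  | a :: _ :: rest, c :: st =>
    if comparingL [a] [c] then
      if st = [] then matchingL rest s else matchingL r st
    else matchingL rest s
  | _, _ => false
  termination_by 3 * (r.length + s.length)
  decreasing_by
    all_goals simp_wf
    all_goals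
      have hL := stripBS_length_le r
      first
      | omega
      | (simp_all; omega)
      | simp_all

def plusL (r s : List Char) : Bool :=
  match hr : r, hs : s with
  | a :: _ :: rest, c :: st =>
    if comparingL [a] [c] then
      match hst : st with
      | [] => matchingL rest s
      | d :: _ =>
        if comparingL [c] [d] then matchingL r st
        else matchingL rest st
    else false
  | _, _ => false
  termination_by 3 * (r.length + s.length)
  decreasing_by
    all_goals simp_wf
    all_goals
      have hL := stripBS_length_le r
      first
      | omega
      | (simp_all; omega)
      | simp_all
end

-- stage_3(regex, string), A's tail recursion on the suffixes of string
def stage_3L (r s : List Char) : Bool :=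
  if comparingL r s then true
  else
    match s with
    | [] => false
    | _ :: st => if matchingL r s then true else stage_3L r st

def stage_3 (regex : String) (string : String) : Bool :=
  stage_3L regex.toList string.toList

-- ===== PORT B =====
-- m(r, s): one self-recursive matcher; single-char comparing is inlined as (a = '.' || a = c)
def mAlt (r s : List Char) : Bool :=
  match h : stripBS r with
  | [] => true
  | [a] =>
    match s with
    | [] => a = '$'
    | c :: st => if a = '.' || a = c then mAlt [] st else false
  | a :: b :: rest =>
    match hs : s with
    | [] => a = '$'
    | c :: st =>
      let eq := a = '.' || a = c
      if (b = '?' || b = '*' || b = '+') && !(a = '\\') then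
        if b = '?' then (if eq then mAlt rest st else mAlt rest s)
        else if b = '*' then
          (if eq then (if st = [] then mAlt rest s else mAlt (a :: b :: rest) st)
           else mAlt rest s)
        else  -- b = '+'
          (if !eq then false
           else
             match hst : st with
             | [] => mAlt rest s
             | d :: _ => if c = '.' || c = d then mAlt (a :: b :: rest) st else mAlt rest st)
      else (if eq then mAlt (b :: rest) st else false)
  termination_by r.length + s.length
  decreasing_by
    all_goals simp_wf
    all_goals
      have hL := stripBS_length_le r
      first
      | omega
      | (simp_all; omega)
      | simp_all

def stage_3_altL (r s : List Char) : Bool :=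
  if r = [] || r = ['.'] || PySem.Chars.endswith s r then true
  else (List.range s.length).any (fun i => mAlt r (s.drop i))

def stage_3_alt (regex : String) (string : String) : Bool :=
  stage_3_altL regex.toList string.toList

-- ===== PRECONDITION & SPEC =====
def Spec_stage_3 (regex : String) (string : String) (out : Bool) : Prop := out = stage_3_alt regex string
instance (regex : String) (string : String) (out : Bool) : Decidable (Spec_stage_3 regex string out) := by unfold Spec_stage_3; infer_instance

-- ===== CLAIM =====
def Claim_equal_stage_3 : Prop := ∀ (regex : String) (string : String), Dom_stage_3 regex string → Spec_stage_3 regex string (stage_3 regex string)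

-- ===== LEMMAS AND PROOFS =====
theorem comparingL_eq (r s : List Char) :
    comparingL r s = (r = [] || r = ['.'] || r = s) := by
  by_cases hd : r = ['.']
  · subst hd
    by_cases hs : s = [] <;> simp [comparingL, hs]
  · by_cases hr : r = []
    · simp [comparingL, hr, hd]
    · by_cases hs : s = [] <;> simp [comparingL, hd, hr, hs] <;> aesop

theorem matchingL_stripNil {r : List Char} (h : stripBS r = []) (s : List Char) :
    matchingL r s = true := by
  rw [matchingL.eq_def]; split <;> simp_all

theorem matchingL_sNil {r : List Char} {a : Char} {rt : List Char}
    (h : stripBS r = a :: rt) : matchingL r [] = (decide (a = '$')) := by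
  rw [matchingL.eq_def]; split <;> simp_all

theorem matchingL_one {r : List Char} {a : Char} (h : stripBS r = [a]) (c : Char) (st : List Char) :
    matchingL r (c :: st) = if comparingL [a] [c] then matchingL [] st else false := by
  rw [matchingL.eq_def]
  split
  · simp_all
  · rename_i a' rt' h2
    rw [h] at h2
    injection h2 with ha hrt
    subst ha; subst hrt
    rfl

theorem matchingL_two {r : List Char} {a b : Char} {rest : List Char}
    (h : stripBS r = a :: b :: rest) (c : Char) (st : List Char) :
    matchingL r (c :: st) =
      if (b = '?' || b = '*' || b = '+') && !(a = '\\') then stage_5L (a :: b :: rest) (c :: st)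
      else if comparingL [a] [c] then matchingL (b :: rest) st else false := by
  rw [matchingL.eq_def]
  split
  · simp_all
  · rename_i a' rt' h2
    rw [h] at h2
    injection h2 with ha hrt
    subst ha; subst hrt
    rfl
theorem mAlt_stripNil {r : List Char} (h : stripBS r = []) (s : List Char) :
    mAlt r s = true := by
  rw [mAlt.eq_def]; split <;> simp_all

theorem mAlt_sNil_one {r : List Char} {a : Char} (h : stripBS r = [a]) :
    mAlt r [] = (decide (a = '$')) := by
  rw [mAlt.eq_def]; split <;> simp_all

theorem mAlt_sNil_two {r : List Char} {a b : Char} {rest : List Char}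
    (h : stripBS r = a :: b :: rest) : mAlt r [] = (decide (a = '$')) := by
  rw [mAlt.eq_def]; split <;> simp_all

theorem mAlt_one {r : List Char} {a : Char} (h : stripBS r = [a]) (c : Char) (st : List Char) :
    mAlt r (c :: st) = if a = '.' || a = c then mAlt [] st else false := by
  rw [mAlt.eq_def]
  split
  · simp_all
  · rename_i a' h2
    rw [h] at h2
    injection h2 with ha _
    subst ha
    rfl
  · rename_i a' b' rest' h2
    rw [h] at h2
    injection h2 with _ h3
    cases h3

theorem mAlt_two_nil {r : List Char} {a b : Char} {rest : List Char}
    (h : stripBS r = a :: b :: rest) (c : Char) :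
    mAlt r [c] =
      (if (b = '?' || b = '*' || b = '+') && !(a = '\\') then
        if b = '?' then (if a = '.' || a = c then mAlt rest [] else mAlt rest [c])
        else if b = '*' then (if a = '.' || a = c then mAlt rest [c] else mAlt rest [c])
        else (if !(a = '.' || a = c) then false else mAlt rest [c])
      else (if a = '.' || a = c then mAlt (b :: rest) [] else false)) := by
  rw [mAlt.eq_def]
  split
  · simp_all
  · rename_i a' h2
    rw [h] at h2
    injection h2 with _ h3
    cases h3
  · rename_i a' b' rest' h2
    rw [h] at h2
    injection h2 with ha h3
    injection h3 with hb hrest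
    subst ha; subst hb; subst hrest
    rfl

theorem mAlt_two_cons {r : List Char} {a b : Char} {rest : List Char}
    (h : stripBS r = a :: b :: rest) (c d : Char) (tail : List Char) :
    mAlt r (c :: d :: tail) =
      (if (b = '?' || b = '*' || b = '+') && !(a = '\\') then
        if b = '?' then (if a = '.' || a = c then mAlt rest (d :: tail) else mAlt rest (c :: d :: tail))
        else if b = '*' then
          (if a = '.' || a = c then mAlt (a :: b :: rest) (d :: tail) else mAlt rest (c :: d :: tail))
        else
          (if !(a = '.' || a = c) then false
           else (if c = '.' || c = d then mAlt (a :: b :: rest) (d :: tail) else mAlt rest (d :: tail)))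
      else (if a = '.' || a = c then mAlt (b :: rest) (d :: tail) else false)) := by
  rw [mAlt.eq_def]
  split
  · simp_all
  · rename_i a' h2
    rw [h] at h2
    injection h2 with _ h3
    cases h3
  · rename_i a' b' rest' h2
    rw [h] at h2
    injection h2 with ha h3
    injection h3 with hb hrest
    subst ha; subst hb; subst hrest
    rfl
theorem comparingL_single (a c : Char) :
    comparingL [a] [c] = (a = '.' || a = c) := by
  by_cases h1 : a = '.' <;> by_cases h2 : a = c <;> simp [comparingL, h1, h2] <;> aesop

theorem matchingL_eq_mAlt (r s : List Char) : matchingL r s = mAlt r s := by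
  induction r, s using mAlt.induct
  case case1 =>
    rename_i r s h
    rw [matchingL_stripNil h, mAlt_stripNil h]
  case case2 =>
    rename_i r a h
    rw [matchingL_sNil h, mAlt_sNil_one h]
  case case3 =>
    rename_i r a h c st heq ih
    rw [matchingL_one h, mAlt_one h]
    simp [comparingL_single, heq, ih]
  case case4 =>
    rename_i r a h c st heq
    rw [matchingL_one h, mAlt_one h]
    simp only [Bool.not_eq_true] at heq
    simp [comparingL_single, heq]
  case case5 =>
    rename_i r a b rest h
    rw [matchingL_sNil h, mAlt_sNil_two h]
  case case6 =>
    rename_i r a rest c st eqv heq h hguard ih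
    have heq2 : (a = '.' || a = c) = true := heq
    rw [matchingL_two h]
    cases st with
    | nil => rw [mAlt_two_nil h]; simp_all [stage_5L, whatL, comparingL_single]
    | cons d tail => rw [mAlt_two_cons h]; simp_all [stage_5L, whatL, comparingL_single]
  case case7 =>
    rename_i r a rest c st eqv heq h hguard ih
    have heq2 : ¬ (a = '.' || a = c) = true := heq
    rw [matchingL_two h]
    cases st with
    | nil => rw [mAlt_two_nil h]; simp_all [stage_5L, whatL, comparingL_single]
    | cons d tail => rw [mAlt_two_cons h]; simp_all [stage_5L, whatL, comparingL_single]
  case case8 =>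
    rename_i r a rest c eqv heq h hguard hne ih
    have heq2 : (a = '.' || a = c) = true := heq
    rw [matchingL_two h, mAlt_two_nil h]
    simp_all [stage_5L, multL, comparingL_single]
  case case9 =>
    rename_i r a rest c st eqv heq hne h hguard hne2 ih
    have heq2 : (a = '.' || a = c) = true := heq
    rw [matchingL_two h]
    cases st with
    | nil => exact absurd rfl hne
    | cons d tail => rw [mAlt_two_cons h]; simp_all [stage_5L, multL, comparingL_single]
  case case10 =>
    rename_i r a rest c st eqv heq h hguard hne ih
    have heq2 : ¬ (a = '.' || a = c) = true := heq
    rw [matchingL_two h]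
    cases st with
    | nil => rw [mAlt_two_nil h]; simp_all [stage_5L, multL, comparingL_single]
    | cons d tail => rw [mAlt_two_cons h]; simp_all [stage_5L, multL, comparingL_single]
  case case11 =>
    rename_i r a b rest h c st eqv hguard hq hm heq
    have heq2 : (!(a = '.' || a = c)) = true := heq
    rw [matchingL_two h]
    cases st with
    | nil => rw [mAlt_two_nil h]; simp_all [stage_5L, plusL, comparingL_single]
    | cons d tail => rw [mAlt_two_cons h]; simp_all [stage_5L, plusL, comparingL_single]
  case case12 =>
    rename_i r a b rest h c eqv hguard hq hm heq ih
    have heq2 : ¬ (!(a = '.' || a = c)) = true := heq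
    rw [matchingL_two h, mAlt_two_nil h]
    simp_all [stage_5L, plusL, comparingL_single]
  case case13 =>
    rename_i r a b rest h c eqv hguard hq hm heq d tail hcd ih
    have heq2 : ¬ (!(a = '.' || a = c)) = true := heq
    rw [matchingL_two h, mAlt_two_cons h]
    simp_all [stage_5L, plusL, comparingL_single]
  case case14 =>
    rename_i r a b rest h c eqv hguard hq hm heq d tail hcd ih
    have heq2 : ¬ (!(a = '.' || a = c)) = true := heq
    rw [matchingL_two h, mAlt_two_cons h]
    simp_all [stage_5L, plusL, comparingL_single]
  case case15 =>
    rename_i r a b rest h c st eqv hguard heq ih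
    have heq2 : (a = '.' || a = c) = true := heq
    have hg2 : ((b = '?' || b = '*' || b = '+') && !(a = '\\')) = false :=
      Bool.of_not_eq_true hguard
    rw [matchingL_two h]
    cases st with
    | nil => rw [mAlt_two_nil h]; simp [hg2, comparingL_single, heq2, ih]
    | cons d tail => rw [mAlt_two_cons h]; simp [hg2, comparingL_single, heq2, ih]
  case case16 =>
    rename_i r a b rest h c st eqv hguard heq
    have heq2 : ¬ (a = '.' || a = c) = true := heq
    have hg2 : ((b = '?' || b = '*' || b = '+') && !(a = '\\')) = false :=
      Bool.of_not_eq_true hguard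
    rw [matchingL_two h]
    cases st with
    | nil => rw [mAlt_two_nil h]; simp [hg2, comparingL_single, heq2]
    | cons d tail => rw [mAlt_two_cons h]; simp [hg2, comparingL_single, heq2]

theorem stage_3L_eq_alt (r s : List Char) : stage_3L r s = stage_3_altL r s := by
  induction s with
  | nil =>
      rw [Bool.eq_iff_iff]
      simp [stage_3L, stage_3_altL, comparingL_eq, PySem.Chars.endswith_iff,
        List.suffix_nil]
  | cons c st ih =>
      rw [Bool.eq_iff_iff]
      rw [stage_3L]
      simp only [stage_3_altL, comparingL_eq, ← matchingL_eq_mAlt] at ih ⊢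
      rw [Bool.eq_iff_iff] at ih
      simp only [List.length_cons, List.range_succ_eq_map, List.any_cons, List.any_map,
        Function.comp_def, List.drop_succ_cons, List.drop_zero] at ih ⊢
      by_cases h1 : r = [] <;> by_cases h2 : r = ['.'] <;>
        simp [h1, h2, PySem.Chars.endswith_iff, List.suffix_cons_iff] at ih ⊢ <;>
        first | tauto | (rw [ih]; tauto)

-- ===== VERDICT =====
theorem stage_3_spec : Claim_equal_stage_3 := by
  intro regex string _
  unfold Spec_stage_3 stage_3 stage_3_alt
  exact stage_3L_eq_alt regex.toList string.toList
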